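-- pv_equiv track=rewrite | github.com/marcosbenigno/primeiro-trabalho-cbd | Tabela.py | localizacao_relativa
-- ===== SOURCE A (Python) =====
-- def localizacao_relativa(esquema):
--     tamanho = 0
--     localizacoes = {}
--     i = 0
--     anterior = 0
--     for atributo in esquema:
--
--         if (i == 0):
--             localizacoes[atributo] = 1
--             tamanho = esquema[atributo][1]
--             anterior = 1
--             i = i + 1
--         else:
--             localizacoes[atributo] = anterior  + tamanho + 1
--             anterior = anterior  + tamanho + 1
--             tamanho = esquema[atributo][1]
--
--             i = i + 1
--
--     return localizacoes
-- ===== SOURCE B (Python) =====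
-- def localizacao_relativa(esquema):
--     keys = list(esquema)
--     return {k: 1 + sum(esquema[p][1] + 1 for p in keys[:i])
--             for i, k in enumerate(keys)}
-- ===== Notes on version B (the rewrite author's own statement) =====
-- stated objective: alternative
-- what changed: Drops A's single stateful sweep (the i==0 special case and the anterior/tamanho running variables) entirely: B computes every key's offset independently by the closed form 1 + sum(size+1 of all earlier keys), a per-key sum over a prefix slice instead of any running accumulator.
import Mathlib
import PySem

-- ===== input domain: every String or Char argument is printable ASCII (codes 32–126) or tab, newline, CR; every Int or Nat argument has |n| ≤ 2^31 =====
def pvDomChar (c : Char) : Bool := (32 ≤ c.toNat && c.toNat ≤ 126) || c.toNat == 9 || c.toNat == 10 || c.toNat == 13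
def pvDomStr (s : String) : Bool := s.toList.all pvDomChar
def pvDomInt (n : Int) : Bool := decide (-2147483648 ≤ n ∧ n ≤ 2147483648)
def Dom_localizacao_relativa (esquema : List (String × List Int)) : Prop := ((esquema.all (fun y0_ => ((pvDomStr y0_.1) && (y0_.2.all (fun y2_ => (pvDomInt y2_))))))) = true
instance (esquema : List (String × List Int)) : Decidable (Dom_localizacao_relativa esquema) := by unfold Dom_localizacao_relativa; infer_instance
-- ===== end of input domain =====

-- B discards A's running-accumulator sweep: each key's offset is the closed form 1 + sum of (size+1) over the earlier keys; objective: alternative (O(n^2) vs A's O(n)).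

-- ===== PORT A =====
-- loop body of A: state = (tamanho, localizacoes, i, anterior); esquema[atributo][1] is
-- PySem.List.pyGet? (none = IndexError, excluded by Pre_; the port defaults to 0 there)
def locStepA (d : PySem.Dict String (List Int)) (st : Int × PySem.Dict String Int × Int × Int) (atributo : String) : Int × PySem.Dict String Int × Int × Int :=
  if st.2.2.1 = 0 then
    ((PySem.List.pyGet? (d.getD atributo []) 1).getD 0, st.2.1.insert atributo 1, st.2.2.1 + 1, 1)
  else
    ((PySem.List.pyGet? (d.getD atributo []) 1).getD 0, st.2.1.insert atributo (st.2.2.2 + st.1 + 1),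
     st.2.2.1 + 1, st.2.2.2 + st.1 + 1)

def localizacao_relativa (esquema : List (String × List Int)) : List (String × Int) :=
  let d := PySem.Dict.ofList esquema
  ((d.keys.foldl (locStepA d) (0, PySem.Dict.empty, 0, 0)).2.1).items

-- ===== PORT B =====
-- Source B: keys = list(esquema); {k: 1 + sum(esquema[p][1] + 1 for p in keys[:i]) for i, k in enumerate(keys)}
def localizacao_relativa_alt (esquema : List (String × List Int)) : List (String × Int) :=
  let d := PySem.Dict.ofList esquema
  let keys := d.keys
  (PySem.Dict.ofList ((PySem.List.enumerate keys).map (fun ik =>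
      (ik.2, 1 + ((PySem.List.slice keys none (some ik.1)).map
        (fun p => (PySem.List.pyGet? (d.getD p []) 1).getD 0 + 1)).sum)))).items

-- ===== PRECONDITION & SPEC =====
-- Pre_ excludes exactly the inputs on which Python A raises IndexError: a schema entry whose
-- value list has fewer than 2 elements (A reads esquema[atributo][1]).
def Pre_localizacao_relativa (esquema : List (String × List Int)) : Prop :=
  ∀ p ∈ esquema, 2 ≤ p.2.length
instance (esquema : List (String × List Int)) : Decidable (Pre_localizacao_relativa esquema) := by unfold Pre_localizacao_relativa; infer_instance
def pvWitness_localizacao_relativa : (List (String × List Int)) := [("id", [4, 8]), ("nome", [1, 20])]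

def Spec_localizacao_relativa (esquema : List (String × List Int)) (out : List (String × Int)) : Prop := out = localizacao_relativa_alt esquema
instance (esquema : List (String × List Int)) (out : List (String × Int)) : Decidable (Spec_localizacao_relativa esquema out) := by unfold Spec_localizacao_relativa; infer_instance

-- ===== CLAIM (what is proved, stated in full; the proofs are below) =====
def Claim_equal_localizacao_relativa : Prop := ∀ (esquema : List (String × List Int)), Dom_localizacao_relativa esquema → Pre_localizacao_relativa esquema → Spec_localizacao_relativa esquema (localizacao_relativa esquema)

-- ===== LEMMAS AND PROOFS =====

-- the pairs A produces after the first iteration: state (anterior = a, tamanho = t)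
def pvPairsA (f : String → Int) : Int → Int → List String → List (String × Int)
  | _, _, [] => []
  | a, t, k :: ks => (k, a + t + 1) :: pvPairsA f (a + t + 1) (f k) ks

-- the common normal form both ports are reduced to
def pvPairsAll (f : String → Int) : List String → List (String × Int)
  | [] => []
  | k :: ks => (k, (1 : Int)) :: pvPairsA f 1 (f k) ks

theorem pv_foldA (d : PySem.Dict String (List Int)) (ks : List String) :
    ∀ (loc : PySem.Dict String Int) (t a i : Int), 1 ≤ i → loc.keys.Nodup →
      (∀ k ∈ ks, loc.contains k = false) → ks.Nodup →
      ((ks.foldl (locStepA d) (t, loc, i, a)).2.1).items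
        = loc.items ++ pvPairsA (fun k => (PySem.List.pyGet? (d.getD k []) 1).getD 0) a t ks := by
  induction ks with
  | nil => intro loc t a i _ _ _ _; simp [pvPairsA]
  | cons k ks ih =>
      intro loc t a i hi hnd hfree hks
      have hi0 : ¬ (i = 0) := by omega
      simp only [List.foldl_cons, locStepA, hi0, if_false]
      rw [ih (loc.insert k (a + t + 1)) _ _ (i + 1) (by omega)
            (PySem.Dict.nodup_keys_insert _ _ _ hnd)
            (by
              intro k' hk'
              have hne : k' ≠ k := by
                rintro rfl; exact (List.nodup_cons.mp hks).1 hk'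
              rw [PySem.Dict.contains_insert]
              simp [hne, hfree k' (List.mem_cons_of_mem _ hk')])
            (List.nodup_cons.mp hks).2]
      rw [PySem.Dict.items_insert_of_not_contains loc _ (hfree k (List.mem_cons_self ..))]
      simp [pvPairsA]

theorem pvA_eq (d : PySem.Dict String (List Int)) (hnd : d.keys.Nodup) :
    ((d.keys.foldl (locStepA d) (0, PySem.Dict.empty, 0, 0)).2.1).items
      = pvPairsAll (fun k => (PySem.List.pyGet? (d.getD k []) 1).getD 0) d.keys := by
  rcases hks : d.keys with _ | ⟨k, ks⟩
  · simp only [List.foldl_nil, pvPairsAll]; rfl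
  · have hnd' : (k :: ks).Nodup := hks ▸ hnd
    simp only [List.foldl_cons]
    rw [show locStepA d (0, PySem.Dict.empty, 0, 0) k
          = ((PySem.List.pyGet? (d.getD k []) 1).getD 0, PySem.Dict.empty.insert k 1, 1, 1) from by
        simp [locStepA]]
    rw [pv_foldA d ks (PySem.Dict.empty.insert k 1) _ 1 1 le_rfl
          (PySem.Dict.nodup_keys_insert _ _ _ PySem.Dict.nodup_keys_empty)
          (by
            intro k' hk'
            have hne : k' ≠ k := by
              rintro rfl; exact (List.nodup_cons.mp hnd').1 hk'
            rw [PySem.Dict.contains_insert]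
            simp [hne, PySem.Dict.contains_empty])
          (List.nodup_cons.mp hnd').2]
    rw [PySem.Dict.items_insert_of_not_contains _ _ (PySem.Dict.contains_empty k)]
    have hie : (PySem.Dict.empty : PySem.Dict String Int).items = [] := rfl
    simp [pvPairsAll, hie]

theorem pv_items_ofList {ν : Type} (l : List (String × ν)) (h : (l.map Prod.fst).Nodup) :
    (PySem.Dict.ofList l).items = l := by
  have := PySem.Dict.items_foldl_insert_fresh (l := l) (k := Prod.fst) (v := Prod.snd)
      PySem.Dict.empty (by intro a _; exact PySem.Dict.contains_empty _) h
  simpa using this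

-- the seed of pvPairsA only matters through a + t
theorem pvPairsA_seed (f : String → Int) (a t : Int) (ks : List String) :
    pvPairsA f a t ks = pvPairsA f (a + t) 0 ks := by
  cases ks with
  | nil => rfl
  | cons k ks => simp [pvPairsA]

-- pvPairsAll is pvPairsA from seed 0
theorem pvPairsAll_eq (f : String → Int) (ks : List String) :
    pvPairsAll f ks = pvPairsA f 0 0 ks := by
  cases ks with
  | nil => rfl
  | cons k ks => simp [pvPairsAll, pvPairsA]

-- B's per-key closed-form sums over prefixes equal pvPairsA from the matching seed
theorem pvB_core (f : String → Int) (L : List String) :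
    ∀ (ks : List String) (n : Nat), L.drop n = ks →
      (PySem.List.enumerate ks (n : Int)).map (fun ik =>
          (ik.2, 1 + ((PySem.List.slice L none (some ik.1)).map (fun p => f p + 1)).sum))
        = pvPairsA f (((L.take n).map (fun p => f p + 1)).sum) 0 ks := by
  intro ks
  induction ks with
  | nil => intro n _; simp [pvPairsA]
  | cons k ks ih =>
      intro n hdrop
      have hget : L[n]? = some k := by
        have h0 : (List.drop n L)[0]? = L[n + 0]? := List.getElem?_drop
        rw [hdrop] at h0
        simpa using h0.symm
      have htake : L.take (n + 1) = L.take n ++ [k] := by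
        rw [List.take_add_one, hget]; rfl
      have hdrop' : L.drop (n + 1) = ks := by
        have h1 : List.drop 1 (List.drop n L) = List.drop (n + 1) L := List.drop_drop
        rw [hdrop] at h1
        simpa using h1.symm
      rw [PySem.List.enumerate_cons]
      simp only [List.map_cons]
      rw [PySem.List.slice_to_natCast]
      have hrec := ih (n + 1) hdrop'
      rw [show ((n : Int) + 1) = ((n + 1 : Nat) : Int) by push_cast; ring]
      rw [hrec, htake]
      conv_rhs => rw [pvPairsA, pvPairsA_seed]
      simp only [List.map_append, List.sum_append, List.map_cons, List.map_nil,
        List.sum_cons, List.sum_nil]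
      congr 1
      · congr 1; ring
      · congr 1; ring

theorem pvB_eq (f : String → Int) (keys : List String) (hnd : keys.Nodup) :
    (PySem.Dict.ofList ((PySem.List.enumerate keys).map (fun ik =>
        (ik.2, 1 + ((PySem.List.slice keys none (some ik.1)).map (fun p => f p + 1)).sum)))).items
      = pvPairsAll f keys := by
  rw [pv_items_ofList]
  · rw [show (0 : Int) = ((0 : Nat) : Int) from rfl]
    rw [pvB_core f keys keys 0 rfl]
    simp [pvPairsAll_eq]
  · rw [List.map_map]
    have : (Prod.fst ∘ fun ik : Int × String =>
        (ik.2, 1 + ((PySem.List.slice keys none (some ik.1)).map (fun p => f p + 1)).sum))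
        = (·.2) := rfl
    rw [this, PySem.List.map_snd_enumerate]
    exact hnd

theorem pv_main (esquema : List (String × List Int)) :
    localizacao_relativa esquema = localizacao_relativa_alt esquema := by
  simp only [localizacao_relativa, localizacao_relativa_alt]
  rw [pvA_eq (PySem.Dict.ofList esquema) (PySem.Dict.nodup_keys_ofList esquema),
      pvB_eq _ _ (PySem.Dict.nodup_keys_ofList esquema)]

-- ===== VERDICT (by name: the statement is the Claim_ definition above) =====
theorem localizacao_relativa_spec : Claim_equal_localizacao_relativa := by
  intro esquema _ _
  unfold Spec_localizacao_relativa
  exact pv_main esquema
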